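-- pv_equiv track=rewrite | github.com/radixark/miles | miles/utils/ft/controller/diagnostics/executors/neighbor_nccl.py | _build_ring_edges
-- ===== SOURCE A (Python) =====
-- def _build_ring_edges(sorted_ids: list[str]) -> list[tuple[str, str]]:
--     """Build undirected ring-topology edges from sorted node IDs.
--
--     Each node connects to its left and right neighbors in a ring.
--     Edges are deduplicated and represented as ``(min_id, max_id)`` tuples.
--     For 2 nodes, produces a single edge.  For N >= 3, produces N edges
--     forming a complete ring.
--     """
--     n = len(sorted_ids)
--     if n < 2:
--         return []
--
--     seen: set[tuple[str, str]] = set()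
--     edges: list[tuple[str, str]] = []
--     for i in range(n):
--         left = (i - 1) % n
--         right = (i + 1) % n
--         for neighbor_idx in (left, right):
--             a, b = sorted_ids[i], sorted_ids[neighbor_idx]
--             edge = (min(a, b), max(a, b))
--             if edge not in seen:
--                 seen.add(edge)
--                 edges.append(edge)
--
--     return edges
-- ===== SOURCE B (Python) =====
-- def _build_ring_edges(sorted_ids: list[str]) -> list[tuple[str, str]]:
--     """Close the ring by prepending the last id, normalize each adjacent pair,
--     then order-preserving dedup in one shot with dict.fromkeys."""
--     if len(sorted_ids) < 2:
--         return []
--     cyc = sorted_ids[-1:] + sorted_ids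
--     raw = [(min(a, b), max(a, b)) for a, b in zip(cyc, cyc[1:])]
--     return list(dict.fromkeys(raw))
-- ===== Notes on version B (the rewrite author's own statement) =====
-- stated objective: simpler
-- what changed: Replaces A's incremental seen-set loop over modular left/right neighbor indices with two staged passes: build the cyclic adjacent-pair list (last id prepended) of normalized edges, then dedup it once with dict.fromkeys.
import Mathlib
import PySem

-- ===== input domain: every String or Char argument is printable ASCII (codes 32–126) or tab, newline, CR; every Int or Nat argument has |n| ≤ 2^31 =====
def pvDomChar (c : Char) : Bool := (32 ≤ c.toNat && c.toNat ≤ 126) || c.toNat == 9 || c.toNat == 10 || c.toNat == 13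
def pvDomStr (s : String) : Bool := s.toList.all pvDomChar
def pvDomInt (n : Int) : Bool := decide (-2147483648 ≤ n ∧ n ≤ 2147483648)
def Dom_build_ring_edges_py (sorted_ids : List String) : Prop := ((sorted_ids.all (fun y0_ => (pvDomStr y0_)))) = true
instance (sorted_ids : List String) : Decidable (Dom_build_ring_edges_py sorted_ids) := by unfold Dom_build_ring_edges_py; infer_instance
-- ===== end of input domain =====

-- B drops A's seen-set loop with modular indexing entirely: it closes the ring by
-- prepending the last id, maps min/max over adjacent pairs, and dedups once with
-- dict.fromkeys (objective: simpler).

-- (min(a, b), max(a, b)) for two Python strings (both ports call Python's min/max this way)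
def pyMinMaxPair (a b : String) : String × String :=
  (if a ≤ b then a else b, if b ≤ a then a else b)

-- ===== PORT A =====
def build_ring_edges_py (sorted_ids : List String) : List (String × String) :=
  let n : Int := sorted_ids.length
  if n < 2 then []
  else
    let st :=
      (PySem.List.pyRange 0 n 1).foldl
        (fun st i =>
          let left := PySem.Int.mod (i - 1) n
          let right := PySem.Int.mod (i + 1) n
          [left, right].foldl
            (fun st neighbor_idx =>
              let a := PySem.List.pyGetD sorted_ids i ""
              let b := PySem.List.pyGetD sorted_ids neighbor_idx ""
              let edge := pyMinMaxPair a b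
              if st.1.contains edge then st else (st.1.add edge, st.2 ++ [edge]))
            st)
        ((PySem.Set.empty : PySem.Set (String × String)), ([] : List (String × String)))
    st.2

-- ===== PORT B =====
def build_ring_edges_py_alt (sorted_ids : List String) : List (String × String) :=
  if sorted_ids.length < 2 then []
  else
    let cyc := PySem.List.slice sorted_ids (some (-1)) none ++ sorted_ids
    let raw := (cyc.zip (PySem.List.slice cyc (some 1) none)).map
      (fun ab => pyMinMaxPair ab.1 ab.2)
    PySem.List.dedup raw

-- ===== PRECONDITION & SPEC =====
def Spec_build_ring_edges_py (sorted_ids : List String) (out : List (String × String)) : Prop := out = build_ring_edges_py_alt sorted_ids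
instance (sorted_ids : List String) (out : List (String × String)) : Decidable (Spec_build_ring_edges_py sorted_ids out) := by unfold Spec_build_ring_edges_py; infer_instance

-- ===== CLAIM (what is proved, stated in full; the proofs are below) =====
def Claim_equal_build_ring_edges_py : Prop := ∀ (sorted_ids : List String), Dom_build_ring_edges_py sorted_ids → Spec_build_ring_edges_py sorted_ids (build_ring_edges_py sorted_ids)

-- ===== LEMMAS AND PROOFS =====

-- the "if edge not in seen: add, append" step A performs
def dedupStep (st : PySem.Set (String × String) × List (String × String))
    (e : String × String) : PySem.Set (String × String) × List (String × String) :=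
  if st.1.contains e then st else (st.1.add e, st.2 ++ [e])

-- the consecutive edge (min, max) of xs[j], xs[j+1], and the closing edge (xs[0], xs[n-1])
def ringEdge (xs : List String) (j : Nat) : String × String :=
  pyMinMaxPair (xs.getD j "") (xs.getD (j + 1) "")

def closeEdge (xs : List String) : String × String :=
  pyMinMaxPair (xs.getD 0 "") (xs.getD (xs.length - 1) "")

-- the two edges A's iteration i pushes: (xs[i], xs[(i-1)%n]) and (xs[i], xs[(i+1)%n]), normalized
def aEdgeL (xs : List String) (i : Nat) : String × String :=
  pyMinMaxPair (PySem.List.pyGetD xs (i : Int) "")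
    (PySem.List.pyGetD xs (PySem.Int.mod ((i : Int) - 1) (xs.length : Int)) "")

def aEdgeR (xs : List String) (i : Nat) : String × String :=
  pyMinMaxPair (PySem.List.pyGetD xs (i : Int) "")
    (PySem.List.pyGetD xs (PySem.Int.mod ((i : Int) + 1) (xs.length : Int)) "")

theorem pyMinMaxPair_comm (a b : String) : pyMinMaxPair a b = pyMinMaxPair b a := by
  unfold pyMinMaxPair
  by_cases h1 : a ≤ b <;> by_cases h2 : b ≤ a
  · have : a = b := le_antisymm h1 h2
    subst this; rfl
  · simp [h1, h2]
  · simp [h1, h2]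
  · exact absurd (le_total a b) (by simp [h1, h2])

theorem dedupStep_of_mem (st : PySem.Set (String × String) × List (String × String))
    (e : String × String) (h : e ∈ st.1) : dedupStep st e = st := by
  unfold dedupStep
  rw [if_pos ((PySem.Set.contains_iff st.1 e).mpr h)]

theorem mem_dedupStep (st : PySem.Set (String × String) × List (String × String))
    (e x : String × String) (h : x ∈ st.1) : x ∈ (dedupStep st e).1 := by
  unfold dedupStep
  split
  · exact h
  · exact (PySem.Set.mem_add st.1 e x).mpr (Or.inl h)

theorem dedupStep_idem (st : PySem.Set (String × String) × List (String × String))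
    (e : String × String) : dedupStep (dedupStep st e) e = dedupStep st e := by
  apply dedupStep_of_mem
  unfold dedupStep
  split
  · exact (PySem.Set.contains_iff st.1 e).mp (by assumption)
  · exact (PySem.Set.mem_add st.1 e e).mpr (Or.inr rfl)

theorem mem_foldl_dedupStep (l : List (String × String))
    (st : PySem.Set (String × String) × List (String × String))
    (x : String × String) (h : x ∈ st.1) : x ∈ (l.foldl dedupStep st).1 := by
  induction l generalizing st with
  | nil => exact h
  | cons e t ih => exact ih _ (mem_dedupStep _ _ _ h)

theorem foldl_dedupStep_doubled (l : List (String × String))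
    (st : PySem.Set (String × String) × List (String × String)) :
    (l.flatMap (fun e => [e, e])).foldl dedupStep st = l.foldl dedupStep st := by
  induction l generalizing st with
  | nil => rfl
  | cons e t ih =>
      simp only [List.flatMap_cons, List.cons_append, List.nil_append, List.foldl_cons,
        dedupStep_idem, ih]

-- on a diagonal state the dedup fold IS Python's set(…)-building fold on both components
theorem foldl_dedupStep_diag (l : List (String × String)) (s : PySem.Set (String × String)) :
    l.foldl dedupStep (s, (s : List (String × String)))
      = (l.foldl PySem.Set.add s, l.foldl PySem.Set.add s) := by
  induction l generalizing s with
  | nil => rfl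
  | cons e t ih =>
      have hstep : dedupStep (s, (s : List (String × String))) e
          = (PySem.Set.add s e, (PySem.Set.add s e : List (String × String))) := by
        simp only [dedupStep, PySem.Set.add]
        split <;> rfl
      rw [List.foldl_cons, hstep, ih, List.foldl_cons]

-- a fold pushing two items per index is a fold over the flattened two-item lists
theorem foldl_two_eq_flatMap {σ α β : Type} (f g : β → α) (step : σ → α → σ)
    (l : List β) (s : σ) :
    l.foldl (fun s i => step (step s (f i)) (g i)) s
      = (l.flatMap (fun i => [f i, g i])).foldl step s := by
  induction l generalizing s with
  | nil => rfl
  | cons b t ih => simp only [List.foldl_cons, List.flatMap_cons, List.cons_append,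
      List.nil_append, ih]

-- d 0 :: [d0,d1]·[d1,d2]·…·[d(m-1),dm] ++ [d m]  =  the doubled list of d0..dm
theorem interleave_eq {α : Type} (d : Nat → α) (m : Nat) :
    ((List.range (m + 1)).map d).flatMap (fun e => [e, e])
      = d 0 :: ((List.range m).flatMap fun j => [d j, d (j + 1)]) ++ [d m] := by
  induction m with
  | zero => simp
  | succ k ih =>
      rw [List.range_succ (n := k + 1), List.map_append, List.flatMap_append, ih,
        List.range_succ (n := k), List.flatMap_append]
      simp

-- index arithmetic for A's modular neighbors
theorem aEdgeL_zero (xs : List String) (h : 2 ≤ xs.length) :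
    aEdgeL xs 0 = closeEdge xs := by
  unfold aEdgeL closeEdge
  have hn : (0 : Int) < (xs.length : Int) := by exact_mod_cast Nat.lt_of_lt_of_le (by norm_num) h
  have hmod : PySem.Int.mod ((((0 : Nat)) : Int) - 1) (xs.length : Int)
      = ((xs.length - 1 : Nat) : Int) := by
    rw [PySem.Int.mod_eq_emod_of_pos hn]
    have h1 : ((((0 : Nat)) : Int) - 1) = ((xs.length : Int) - 1) + (xs.length : Int) * (-1) := by
      push_cast; ring
    rw [h1, Int.add_mul_emod_self_left, Int.emod_eq_of_lt (by omega) (by omega)]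
    omega
  rw [hmod, PySem.List.pyGetD_natCast, PySem.List.pyGetD_natCast]

theorem aEdgeL_succ (xs : List String) (i : Nat) (h : i < xs.length) :
    aEdgeL xs (i + 1) = ringEdge xs i := by
  unfold aEdgeL ringEdge
  have hn : (0 : Int) < (xs.length : Int) := by exact_mod_cast Nat.lt_of_le_of_lt (Nat.zero_le i) h
  have hmod : PySem.Int.mod (((i + 1 : Nat) : Int) - 1) (xs.length : Int) = ((i : Nat) : Int) := by
    rw [PySem.Int.mod_eq_emod_of_pos hn]
    have h1 : (((i + 1 : Nat) : Int) - 1) = ((i : Nat) : Int) := by push_cast; ring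
    rw [h1, Int.emod_eq_of_lt (by omega) (by exact_mod_cast h)]
  rw [hmod, PySem.List.pyGetD_natCast, PySem.List.pyGetD_natCast, pyMinMaxPair_comm]

theorem aEdgeR_lt (xs : List String) (i : Nat) (h : i + 1 < xs.length) :
    aEdgeR xs i = ringEdge xs i := by
  unfold aEdgeR ringEdge
  have hmod : PySem.Int.mod (((i : Nat) : Int) + 1) (xs.length : Int) = ((i + 1 : Nat) : Int) := by
    rw [PySem.Int.mod_eq_emod_of_pos (by exact_mod_cast Nat.lt_of_le_of_lt (Nat.zero_le _) h)]
    rw [Int.emod_eq_of_lt (by omega) (by exact_mod_cast h)]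
    push_cast; ring
  rw [hmod, PySem.List.pyGetD_natCast, PySem.List.pyGetD_natCast]

theorem aEdgeR_last (xs : List String) (h : 2 ≤ xs.length) :
    aEdgeR xs (xs.length - 1) = closeEdge xs := by
  unfold aEdgeR closeEdge
  have hmod : PySem.Int.mod (((xs.length - 1 : Nat) : Int) + 1) (xs.length : Int) = ((0 : Nat) : Int) := by
    rw [PySem.Int.mod_eq_emod_of_pos (by exact_mod_cast Nat.lt_of_lt_of_le (by norm_num) h)]
    have h1 : (((xs.length - 1 : Nat) : Int) + 1) = (xs.length : Int) := by
      have : 1 ≤ xs.length := by omega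
      push_cast [this]; ring
    rw [h1, Int.emod_self]
    simp
  rw [hmod, PySem.List.pyGetD_natCast, PySem.List.pyGetD_natCast, pyMinMaxPair_comm]

-- A's full edge stream: closing edge first, each consecutive edge twice, closing edge last
theorem aSeq_eq (xs : List String) (h : 2 ≤ xs.length) :
    ((List.range xs.length).flatMap fun i => [aEdgeL xs i, aEdgeR xs i])
      = closeEdge xs
          :: (((List.range (xs.length - 1)).map (ringEdge xs)).flatMap fun e => [e, e])
          ++ [closeEdge xs] := by
  obtain ⟨m, hm⟩ : ∃ m, xs.length = m + 2 := ⟨xs.length - 2, by omega⟩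
  have hlast := aEdgeR_last xs h
  rw [hm] at hlast ⊢
  have h21 : m + 2 - 1 = m + 1 := rfl
  rw [h21] at hlast ⊢
  rw [List.range_succ_eq_map, List.flatMap_cons, List.flatMap_map,
    List.range_succ (n := m), List.flatMap_append, List.flatMap_cons, List.flatMap_nil,
    List.append_nil]
  simp only [Nat.succ_eq_add_one]
  rw [aEdgeL_zero xs h, aEdgeR_lt xs 0 (by omega), aEdgeL_succ xs m (by omega), hlast]
  have hmid : ((List.range m).flatMap fun a => [aEdgeL xs (a + 1), aEdgeR xs (a + 1)])
      = (List.range m).flatMap fun j => [ringEdge xs j, ringEdge xs (j + 1)] := by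
    rw [List.flatMap_def, List.flatMap_def]
    congr 1
    apply List.map_congr_left
    intro a ha
    have ham : a < m := List.mem_range.mp ha
    rw [aEdgeL_succ xs a (by omega), aEdgeR_lt xs (a + 1) (by omega)]
  rw [hmid, show List.range m ++ [m] = List.range (m + 1) from (List.range_succ).symm,
    interleave_eq (fun j => ringEdge xs j) m]
  simp

-- A as one dedup fold over its edge stream
theorem build_ring_edges_py_eq (xs : List String) (h : 2 ≤ xs.length) :
    build_ring_edges_py xs
      = (((List.range xs.length).flatMap fun i => [aEdgeL xs i, aEdgeR xs i]).foldl dedupStep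
          ((PySem.Set.empty : PySem.Set (String × String)), [])).2 := by
  have h2 : ¬ ((xs.length : Int) < 2) := by exact_mod_cast not_lt.mpr (by exact_mod_cast h)
  simp only [build_ring_edges_py, if_neg h2, PySem.List.pyRange_zero_natCast, List.foldl_map]
  exact congrArg Prod.snd
    (foldl_two_eq_flatMap (aEdgeL xs) (aEdgeR xs) dedupStep (List.range xs.length) _)

-- B: the cyclic pair list is the closing edge followed by the consecutive edges
theorem build_ring_edges_py_alt_eq (xs : List String) (h : 2 ≤ xs.length) :
    build_ring_edges_py_alt xs
      = PySem.List.dedup (closeEdge xs :: (List.range (xs.length - 1)).map (ringEdge xs)) := by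
  have hne : xs ≠ [] := by intro hx; rw [hx] at h; simp at h
  obtain ⟨y, ys, hy⟩ := List.exists_cons_of_ne_nil hne
  have hdrop : xs.drop (xs.length - 1) = [xs.getD (xs.length - 1) ""] := by
    apply List.ext_getElem
    · simp
      omega
    · intro i h1 h2
      simp only [List.length_drop] at h1
      simp only [List.getElem_drop]
      have hi : i = 0 := by omega
      subst hi
      simp only [List.getElem_cons_zero]
      rw [List.getD_eq_getElem xs "" (by omega)]
      simp
  have hzip : (xs.zip xs.tail).map (fun ab => pyMinMaxPair ab.1 ab.2)
      = (List.range (xs.length - 1)).map (ringEdge xs) := by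
    apply List.ext_getElem
    · simp [List.length_zip, List.length_tail]
    · intro i h1 h2
      simp only [List.getElem_map, List.getElem_zip, List.getElem_tail, List.getElem_range]
      unfold ringEdge
      have hi : i < xs.length - 1 := by
        simp only [List.length_map, List.length_range] at h2
        exact h2
      rw [List.getD_eq_getElem xs "" (by omega), List.getD_eq_getElem xs "" (by omega)]
  have hcons : (xs.getD (xs.length - 1) "" :: xs).zip xs
      = (xs.getD (xs.length - 1) "", xs.getD 0 "") :: xs.zip xs.tail := by
    conv_lhs => rw [hy]
    rw [List.zip_cons_cons]
    simp [hy]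
  simp only [build_ring_edges_py_alt, if_neg (show ¬ xs.length < 2 by omega)]
  rw [PySem.List.slice_from_neg_one, PySem.List.slice_from_one, hdrop]
  simp only [List.singleton_append, List.tail_cons]
  rw [hcons, List.map_cons, hzip]
  have hhead : pyMinMaxPair (xs.getD (xs.length - 1) "") (xs.getD 0 "") = closeEdge xs := by
    unfold closeEdge; exact pyMinMaxPair_comm _ _
  simp only [hhead]

-- ===== VERDICT (by name: the statement is the Claim_ definition above) =====
theorem build_ring_edges_py_spec : Claim_equal_build_ring_edges_py := by
  intro xs _
  unfold Spec_build_ring_edges_py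
  by_cases h : 2 ≤ xs.length
  · rw [build_ring_edges_py_eq xs h, build_ring_edges_py_alt_eq xs h, aSeq_eq xs h]
    have hstep : dedupStep ((PySem.Set.empty : PySem.Set (String × String)), []) (closeEdge xs)
        = (PySem.Set.add PySem.Set.empty (closeEdge xs),
            (PySem.Set.add PySem.Set.empty (closeEdge xs) : List (String × String))) := by
      simp only [dedupStep, PySem.Set.add]
      split <;> rfl
    have h1 : List.foldl dedupStep ((PySem.Set.empty : PySem.Set (String × String)), [])
          (closeEdge xs
            :: (((List.range (xs.length - 1)).map (ringEdge xs)).flatMap fun e => [e, e]))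
        = List.foldl dedupStep
            (PySem.Set.add PySem.Set.empty (closeEdge xs),
              (PySem.Set.add PySem.Set.empty (closeEdge xs) : List (String × String)))
            ((List.range (xs.length - 1)).map (ringEdge xs)) := by
      rw [List.foldl_cons, hstep, foldl_dedupStep_doubled]
    rw [List.foldl_append, h1, List.foldl_cons, List.foldl_nil,
      dedupStep_of_mem _ _ (mem_foldl_dedupStep _ _ _
        ((PySem.Set.mem_add PySem.Set.empty (closeEdge xs) (closeEdge xs)).mpr (Or.inr rfl))),
      foldl_dedupStep_diag]
    rw [PySem.List.dedup_eq_ofList, PySem.Set.ofList_eq_foldl, List.foldl_cons]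
    rfl
  · have hA : (xs.length : Int) < 2 := by exact_mod_cast (show xs.length < 2 by omega)
    simp only [build_ring_edges_py, build_ring_edges_py_alt, if_pos hA,
      if_pos (show xs.length < 2 by omega)]
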